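-- pv_equiv track=rewrite | github.com/allenai/aries | aries/util/edit.py | build_offsets
-- ===== SOURCE A (Python) =====
-- from typing import Iterable, List, Tuple, Union
--
-- def build_offsets(
--     toks: Union[str, List[str]],
--     chunk_length: int,
-- ) -> dict:
--     offsets = dict()
--     for idx in range(len(toks) - chunk_length + 1):
--         chunk = tuple(toks[idx : idx + chunk_length])
--         if chunk not in offsets:
--             offsets[chunk] = []
--         offsets[chunk].append(idx)
--     return offsets
-- ===== SOURCE B (Python) =====
-- def build_offsets(toks, chunk_length):
--     chunks = [tuple(toks[i : i + chunk_length]) for i in range(len(toks) - chunk_length + 1)]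
--     return {c: [i for i, d in enumerate(chunks) if d == c] for c in dict.fromkeys(chunks)}
-- ===== Notes on version B (the rewrite author's own statement) =====
-- stated objective: alternative
-- what changed: A buckets indices into a dict in one pass; B materialises the chunk list, deduplicates the keys in first-occurrence order, and collects each key's indices by a per-key scan of the enumerated chunk list (dict/set comprehension decomposition).
import Mathlib
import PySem

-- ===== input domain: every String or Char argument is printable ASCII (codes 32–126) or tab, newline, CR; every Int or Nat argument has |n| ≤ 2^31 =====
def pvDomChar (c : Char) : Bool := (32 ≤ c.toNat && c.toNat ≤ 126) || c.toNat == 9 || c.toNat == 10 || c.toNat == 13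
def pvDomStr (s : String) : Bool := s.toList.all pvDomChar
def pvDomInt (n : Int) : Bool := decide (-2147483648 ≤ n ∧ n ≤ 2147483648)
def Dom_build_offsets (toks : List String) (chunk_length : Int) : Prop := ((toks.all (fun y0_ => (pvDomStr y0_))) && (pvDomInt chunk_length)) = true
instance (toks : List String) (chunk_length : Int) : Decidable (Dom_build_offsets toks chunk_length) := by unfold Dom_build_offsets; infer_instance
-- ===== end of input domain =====

-- B replaces A's one-pass dict bucketing by: list all chunks, dedup the keys in first-occurrence
-- order, then collect each key's indices with a per-key scan (alternative decomposition, same result).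


-- ===== PORT A =====
-- for idx in range(len(toks)-chunk_length+1): chunk = tuple(toks[idx:idx+chunk_length]);
-- the 'if chunk not in offsets: offsets[chunk]=[]' + 'offsets[chunk].append(idx)' pattern is Dict.modify
def build_offsets (toks : List String) (chunk_length : Int) : List (List String × List Int) :=
  ((PySem.List.pyRange 0 ((toks.length : Int) - chunk_length + 1) 1).foldl
    (fun offsets idx =>
      offsets.modify (PySem.List.slice toks (some idx) (some (idx + chunk_length))) [] (· ++ [idx]))
    PySem.Dict.empty).items

-- ===== PORT B =====
-- chunks = [tuple(toks[i:i+chunk_length]) for i in range(len(toks)-chunk_length+1)]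
-- {c: [i for i, d in enumerate(chunks) if d == c] for c in dict.fromkeys(chunks)}
def build_offsets_alt (toks : List String) (chunk_length : Int) : List (List String × List Int) :=
  let chunks := (PySem.List.pyRange 0 ((toks.length : Int) - chunk_length + 1) 1).map
    (fun i => PySem.List.slice toks (some i) (some (i + chunk_length)))
  (PySem.List.dedup chunks).map
    (fun c => (c, ((PySem.List.enumerate chunks 0).filter (fun p => p.2 == c)).map (·.1)))

-- ===== PRECONDITION & SPEC =====
def Spec_build_offsets (toks : List String) (chunk_length : Int) (out : List (List String × List Int)) : Prop := out = build_offsets_alt toks chunk_length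
instance (toks : List String) (chunk_length : Int) (out : List (List String × List Int)) : Decidable (Spec_build_offsets toks chunk_length out) := by unfold Spec_build_offsets; infer_instance

-- ===== CLAIM (what is proved, stated in full; the proofs are below) =====
def Claim_equal_build_offsets : Prop := ∀ (toks : List String) (chunk_length : Int), Dom_build_offsets toks chunk_length → Spec_build_offsets toks chunk_length (build_offsets toks chunk_length)

-- ===== LEMMAS AND PROOFS =====

-- enumerating a list produced by mapping over range(a,b) pairs each element with its own range value
theorem pv_enum_map_range {α : Type} (f : Int → α) (a b : Int) :
    PySem.List.enumerate ((PySem.List.pyRange a b 1).map f) a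
      = (PySem.List.pyRange a b 1).map (fun i => (i, f i)) := by
  by_cases h : b ≤ a
  · simp [PySem.List.pyRange_one_eq_nil h, PySem.List.enumerate_nil]
  · rw [PySem.List.pyRange_one_cons (by omega)]
    simp only [List.map_cons, PySem.List.enumerate_cons]
    rw [pv_enum_map_range f (a+1) b]
termination_by (b - a).toNat
decreasing_by omega

-- ===== VERDICT (by name: the statement is the Claim_ definition above) =====

theorem build_offsets_spec : Claim_equal_build_offsets := by
  intro toks chunk_length _
  unfold Spec_build_offsets build_offsets build_offsets_alt
  set r := PySem.List.pyRange 0 ((toks.length : Int) - chunk_length + 1) 1 with hr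
  set g := fun i : Int => PySem.List.slice toks (some i) (some (i + chunk_length)) with hg
  -- A's fold as a fold over (key, idx) pairs
  have hfold :
      r.foldl (fun offsets idx => offsets.modify (g idx) [] (· ++ [idx])) PySem.Dict.empty
        = (r.map (fun i => ((g i, i) : (List String) × Int))).foldl
            (fun d p => d.modify p.1 [] (· ++ [p.2])) PySem.Dict.empty := by
    rw [List.foldl_map]
  rw [hfold]
  set L := r.map (fun i => ((g i, i) : (List String) × Int)) with hL
  set D := L.foldl (fun d p => d.modify p.1 [] (· ++ [p.2])) PySem.Dict.empty with hD
  have hnodup : D.keys.Nodup := by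
    rw [hD, hL, List.foldl_map]
    exact PySem.Dict.nodup_keys_foldl_modify_key r g [] (fun d i => (· ++ [i])) PySem.Dict.empty
      (by simp)
  have hkeys : D.keys = PySem.List.dedup (r.map g) := by
    rw [hD, hL, List.foldl_map]
    rw [PySem.Dict.keys_foldl_modify_key (key := g)]
    simp [PySem.Set.update_nil_left]
  have hitems : D.items = D.keys.map (fun k => (k, D.getD k [])) :=
    PySem.Dict.items_eq_map_keys D hnodup []
  rw [hitems, hkeys]
  -- both sides are maps over the same deduplicated key list; compare values pointwise
  apply List.map_congr_left
  intro c _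
  have hgetD : D.getD c [] = (L.filter (fun p => p.1 == c)).map (·.2) := by
    rw [hD]
    simpa using PySem.Dict.getD_foldl_modify_append L PySem.Dict.empty c
  rw [hgetD, hL]
  rw [pv_enum_map_range g 0 ((toks.length : Int) - chunk_length + 1)]
  simp [List.filter_map, List.map_map, Function.comp_def]
  rfl
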